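-- pv_equiv track=rewrite | github.com/DonSimon-0815/libpff | dotnet/generate_interop.py | c_to_cs_name
-- ===== SOURCE A (Python) =====
-- CS_KEYWORDS = {
--     "string", "int", "long", "uint", "byte", "sbyte", "short", "ushort",
--     "char", "object", "decimal", "double", "float", "bool", "nint", "nuint",
--     "void"
-- }
--
-- def c_to_cs_name(c_name: str) -> str:
--     """Convert C function name to C# PascalCase without the 'libpff_' prefix."""
--     s = c_name
--     # remove libpff_ prefix if present
--     if s.startswith("libpff_"):
--         s = s[len("libpff_"):]
--     # split on underscores and capitalize each segment
--     parts = [p for p in s.split("_") if p]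
--     if not parts:
--         cs = c_name
--     else:
--         cs = "".join(part.capitalize() for part in parts)
--     # ensure it doesn't start with a digit
--     if cs and cs[0].isdigit():
--         cs = "_" + cs
--     # avoid simple keyword collision (CS_KEYWORDS contains lowercase tokens)
--     if cs.lower() in CS_KEYWORDS:
--         cs = cs + "_"
--     return cs
-- ===== SOURCE B (Python) =====
-- CS_KEYWORDS = {
--     "string", "int", "long", "uint", "byte", "sbyte", "short", "ushort",
--     "char", "object", "decimal", "double", "float", "bool", "nint", "nuint",
--     "void"
-- }
--
-- def c_to_cs_name(c_name: str) -> str: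
--     """Convert C function name to C# PascalCase without the 'libpff_' prefix."""
--     s = c_name.removeprefix("libpff_")
--     # positional lookback instead of split/capitalize/join: a letter starts a word
--     # iff it is first or follows '_', which the '_' sentinel in zip encodes
--     body = "".join(cur.upper() if prev == "_" else cur.lower()
--                    for prev, cur in zip("_" + s, s) if cur != "_")
--     cs = body or c_name
--     if cs[:1].isdigit():
--         cs = "_" + cs
--     return cs + "_" if cs.lower() in CS_KEYWORDS else cs
-- ===== Notes on version B (the rewrite author's own statement) =====
-- stated objective: alternative
-- what changed: Replaces A's split-on-underscore / capitalize-each-segment / join pipeline by a single filtered zip of the string with an underscore-sentinel shifted copy of itself: each kept character is uppercased iff its predecessor (or the sentinel) is an underscore, so no segment list is ever built.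
import Mathlib
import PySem

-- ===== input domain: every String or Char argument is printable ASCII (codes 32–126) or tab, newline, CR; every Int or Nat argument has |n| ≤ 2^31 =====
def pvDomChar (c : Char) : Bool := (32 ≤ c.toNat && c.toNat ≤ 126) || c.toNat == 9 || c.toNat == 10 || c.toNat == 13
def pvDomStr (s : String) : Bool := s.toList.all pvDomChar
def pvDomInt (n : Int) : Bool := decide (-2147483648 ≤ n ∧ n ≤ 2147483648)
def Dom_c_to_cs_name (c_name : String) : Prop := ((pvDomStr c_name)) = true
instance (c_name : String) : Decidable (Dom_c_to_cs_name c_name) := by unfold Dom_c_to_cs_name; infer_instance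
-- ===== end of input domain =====

-- B replaces A's split-on-underscore / capitalize-each-part / join pipeline by one filtered
-- zip of the string with an underscore-sentinel shifted copy of itself (objective: alternative, same cost).

-- ===== PORT A =====

-- the CS_KEYWORDS set literal (a Python set of strings)
def pvKeywords : PySem.Set (List Char) := PySem.Set.ofList
  ["string".toList, "int".toList, "long".toList, "uint".toList, "byte".toList,
   "sbyte".toList, "short".toList, "ushort".toList, "char".toList, "object".toList,
   "decimal".toList, "double".toList, "float".toList, "bool".toList, "nint".toList,
   "nuint".toList, "void".toList]

-- Python str.capitalize(): first char uppercased, the rest lowercased (exact on ASCII)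
def pvCap : List Char → List Char
  | [] => []
  | c :: r => PySem.Chars.upperChar c :: PySem.Chars.lower r

def pvACore (c_name : String) : List Char :=
  let cl := c_name.toList
  -- s = s[len("libpff_"):] if the prefix is present
  let s := if PySem.Chars.startswith cl ("libpff_".toList) then PySem.List.slice cl (some 7) none else cl
  -- parts = [p for p in s.split("_") if p]
  let parts := (PySem.Chars.splitOn s ['_']).filter (fun p => !p.isEmpty)
  let cs0 := if parts.isEmpty then cl else PySem.Chars.join [] (parts.map pvCap)
  -- if cs and cs[0].isdigit(): cs = "_" + cs
  let cs1 := match cs0 with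
    | [] => cs0
    | c :: _ => if PySem.Chars.isdigit c then '_' :: cs0 else cs0
  -- if cs.lower() in CS_KEYWORDS: cs = cs + "_"
  if PySem.Set.contains pvKeywords (PySem.Chars.lower cs1) then cs1 ++ ['_'] else cs1

def c_to_cs_name (c_name : String) : String := String.ofList (pvACore c_name)

-- ===== PORT B =====

-- the per-pair rule of Source B's comprehension: drop underscores, else case by the predecessor
def pvPairEmit (pc : Char × Char) : Option Char :=
  if pc.2 = '_' then none
  else some (if pc.1 = '_' then PySem.Chars.upperChar pc.2 else PySem.Chars.lowerChar pc.2)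

def pvBCore (c_name : String) : List Char :=
  let cl := c_name.toList
  -- s = c_name.removeprefix("libpff_")
  let s := if PySem.Chars.startswith cl ("libpff_".toList) then PySem.List.slice cl (some 7) none else cl
  -- body = "".join(... for prev, cur in zip("_" + s, s) if cur != "_")
  let body := (List.zip ('_' :: s) s).filterMap pvPairEmit
  -- cs = body or c_name
  let cs := if body = [] then cl else body
  -- if cs[:1].isdigit(): cs = "_" + cs
  let cs := if PySem.Chars.strIsdigit (PySem.List.slice cs none (some 1)) then '_' :: cs else cs
  -- return cs + "_" if cs.lower() in CS_KEYWORDS else cs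
  if PySem.Set.contains pvKeywords (PySem.Chars.lower cs) then cs ++ ['_'] else cs

def c_to_cs_name_alt (c_name : String) : String := String.ofList (pvBCore c_name)

-- ===== PRECONDITION & SPEC =====
def Spec_c_to_cs_name (c_name : String) (out : String) : Prop := out = c_to_cs_name_alt c_name
instance (c_name : String) (out : String) : Decidable (Spec_c_to_cs_name c_name out) := by unfold Spec_c_to_cs_name; infer_instance

-- ===== CLAIM (what is proved, stated in full; the proofs are below) =====
def Claim_equal_c_to_cs_name : Prop := ∀ (c_name : String), Dom_c_to_cs_name c_name → Spec_c_to_cs_name c_name (c_to_cs_name c_name)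

-- ===== LEMMAS AND PROOFS =====

-- proof-side description of B's zip pass: a left-to-right scan with a word-start flag
def pvScan : List Char → Bool → List Char
  | [], _ => []
  | c :: r, start =>
      if c = '_' then pvScan r true
      else (if start then PySem.Chars.upperChar c else PySem.Chars.lowerChar c) :: pvScan r false

lemma pvZip_eq_scan : ∀ (l : List Char) (p : Char),
    (List.zip (p :: l) l).filterMap pvPairEmit = pvScan l (p = '_') := by
  intro l
  induction l with
  | nil => intro p; simp [pvScan]
  | cons c r ih =>
      intro p
      rw [List.zip_cons_cons, List.filterMap_cons]
      by_cases hc : c = '_'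
      · subst hc
        simpa [pvPairEmit, pvScan] using ih '_'
      · simpa [pvPairEmit, pvScan, hc] using ih c

-- a simple structural recursion computing Python's split on a single '_' separator
def pvSplitU : List Char → List (List Char)
  | [] => [[]]
  | c :: r => if c = '_' then [] :: pvSplitU r
      else match pvSplitU r with
        | [] => [[c]]
        | p :: ps => (c :: p) :: ps

lemma pvSplitU_ne_nil (l : List Char) : pvSplitU l ≠ [] := by
  cases l with
  | nil => simp [pvSplitU]
  | cons c r =>
      simp only [pvSplitU]
      split
      · simp
      · split <;> simp_all

def pvPrep (x : List Char) : List (List Char) → List (List Char)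
  | [] => [x]
  | p :: ps => (x ++ p) :: ps

lemma pvGo_eq (l : List Char) : ∀ (fuel : Nat) (cur : List Char) (acc : List (List Char)),
    l.length < fuel →
    PySem.Chars.splitOn.go ['_'] fuel l cur acc = acc.reverse ++ pvPrep cur.reverse (pvSplitU l) := by
  induction l with
  | nil =>
      intro fuel cur acc h
      cases fuel with
      | zero => omega
      | succ f => simp [PySem.Chars.splitOn.go, pvSplitU, pvPrep]
  | cons c r ih =>
      intro fuel cur acc h
      cases fuel with
      | zero => simp at h
      | succ f =>
          rw [PySem.Chars.splitOn.go]
          by_cases hc : c = '_'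
          · subst hc
            have hpre : List.isPrefixOf ['_'] ('_' :: r) = true := by simp [List.isPrefixOf]
            rw [if_pos hpre]
            have hgo := ih f [] (cur.reverse :: acc) (by simp at h; omega)
            simp only [List.length_cons, List.length_nil, List.drop_succ_cons, List.drop_zero]
            rw [hgo]
            rcases hr : pvSplitU r with _ | ⟨p, ps⟩
            · exact absurd hr (pvSplitU_ne_nil r)
            · simp [pvSplitU, hr, pvPrep]
          · have hpre : List.isPrefixOf ['_'] (c :: r) = false := by
              simp [List.isPrefixOf]; exact fun hh => (hc hh.symm).elim
            rw [if_neg (by simp [hpre])]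
            have hgo := ih f (c :: cur) acc (by simp at h; omega)
            rw [hgo]
            simp only [pvSplitU, if_neg hc]
            rcases hr : pvSplitU r with _ | ⟨p, ps⟩
            · exact absurd hr (pvSplitU_ne_nil r)
            · simp [pvPrep]

lemma pvSplitOn_eq (l : List Char) : PySem.Chars.splitOn l ['_'] = pvSplitU l := by
  have h := pvGo_eq l (l.length + 1) [] [] (by omega)
  rcases hr : pvSplitU l with _ | ⟨p, ps⟩
  · exact absurd hr (pvSplitU_ne_nil l)
  · simpa [PySem.Chars.splitOn, pvPrep, hr] using h

-- the joined A-pipeline applied to a list of parts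
def pvG (ps : List (List Char)) : List Char :=
  PySem.Chars.join [] ((ps.filter (fun p => !p.isEmpty)).map pvCap)

lemma pvJoin_nil_eq_flatten (ps : List (List Char)) :
    PySem.Chars.join [] ps = ps.flatten := by
  induction ps with
  | nil => simp [PySem.Chars.join_nil]
  | cons p ps ih =>
      cases ps with
      | nil => simp [PySem.Chars.join_singleton]
      | cons q qs => rw [PySem.Chars.join_cons_cons]; simp [ih]

lemma pvScan_eq (l : List Char) :
    pvScan l true = pvG (pvSplitU l) ∧
    pvScan l false = (match pvSplitU l with
      | [] => []
      | p :: ps => PySem.Chars.lower p ++ pvG ps) := by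
  induction l with
  | nil => simp [pvScan, pvSplitU, pvG, PySem.Chars.join_nil, PySem.Chars.lower]
  | cons c r ih =>
      by_cases hc : c = '_'
      · subst hc
        simp only [pvScan, pvSplitU]
        refine ⟨?_, ?_⟩
        · rw [ih.1]; simp [pvG]
        · rw [ih.1]; simp [PySem.Chars.lower]
      · simp only [pvScan, if_neg hc, pvSplitU]
        rcases hr : pvSplitU r with _ | ⟨p, ps⟩
        · exact absurd hr (pvSplitU_ne_nil r)
        · have h2 := ih.2; rw [hr] at h2
          constructor
          · rw [h2]
            simp [pvG, pvCap, pvJoin_nil_eq_flatten, PySem.Chars.lower]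
          · rw [h2]
            simp [PySem.Chars.lower]

lemma pvG_nil_iff (ps : List (List Char)) :
    pvG ps = [] ↔ ps.filter (fun p => !p.isEmpty) = [] := by
  rw [pvG, pvJoin_nil_eq_flatten]
  constructor
  · intro h
    rcases hf : ps.filter (fun p => !p.isEmpty) with _ | ⟨p, qs⟩
    · exact hf
    · exfalso
      have hp : p ∈ ps.filter (fun p => !p.isEmpty) := by rw [hf]; simp
      have hpne : p ≠ [] := by
        have := List.of_mem_filter hp
        simpa [List.isEmpty_iff] using this
      rw [hf] at h
      rcases p with _ | ⟨c, r⟩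
      · exact hpne rfl
      · simp [pvCap] at h
  · intro h; rw [h]; simp

-- B's cs[:1].isdigit() agrees with A's 'cs and cs[0].isdigit()' branch
lemma pvHead_digit (cs : List Char) :
    (if PySem.Chars.strIsdigit (PySem.List.slice cs none (some 1)) then '_' :: cs else cs)
      = (match cs with
         | [] => cs
         | c :: _ => if PySem.Chars.isdigit c then '_' :: cs else cs) := by
  rcases cs with _ | ⟨c, r⟩
  · simp [PySem.List.slice, PySem.Chars.strIsdigit]
  · have hsl : PySem.List.slice (c :: r) none (some 1) = [c] := by
      simpa using PySem.List.slice_to (c :: r) (b := 1) (by norm_num)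
    rw [hsl]
    simp [PySem.Chars.strIsdigit]

-- ===== VERDICT (by name: the statement is the Claim_ definition above) =====
theorem c_to_cs_name_spec : Claim_equal_c_to_cs_name := by
  intro c_name _
  unfold Spec_c_to_cs_name c_to_cs_name c_to_cs_name_alt pvACore pvBCore
  simp only []
  set cl := c_name.toList with hcl
  set s := if PySem.Chars.startswith cl ("libpff_".toList) then PySem.List.slice cl (some 7) none else cl with hs
  have hbody : (List.zip ('_' :: s) s).filterMap pvPairEmit = pvScan s true := by
    simpa using pvZip_eq_scan s '_'
  have hscan := (pvScan_eq s).1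
  have hjoin : PySem.Chars.join []
      (((PySem.Chars.splitOn s ['_']).filter (fun p => !p.isEmpty)).map pvCap) = pvScan s true := by
    rw [pvSplitOn_eq, hscan]; rfl
  have hflt : ((PySem.Chars.splitOn s ['_']).filter (fun p => !p.isEmpty)).isEmpty = true
      ↔ pvScan s true = [] := by
    rw [pvSplitOn_eq]
    constructor
    · intro h
      rw [hscan]
      exact (pvG_nil_iff _).2 (by simpa [List.isEmpty_iff] using h)
    · intro h
      rw [hscan] at h
      simpa [List.isEmpty_iff] using (pvG_nil_iff _).1 h
  have hcs0 : (if ((PySem.Chars.splitOn s ['_']).filter (fun p => !p.isEmpty)).isEmpty then cl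
        else PySem.Chars.join [] (((PySem.Chars.splitOn s ['_']).filter (fun p => !p.isEmpty)).map pvCap))
      = (if (List.zip ('_' :: s) s).filterMap pvPairEmit = [] then cl
        else (List.zip ('_' :: s) s).filterMap pvPairEmit) := by
    rw [hbody, hjoin]
    by_cases h : pvScan s true = []
    · simp [h, hflt.2 h]
    · have hne : ¬ ((PySem.Chars.splitOn s ['_']).filter (fun p => !p.isEmpty)).isEmpty = true :=
        fun hh => h (hflt.1 hh)
      simp [h, hne]
  rw [hcs0, pvHead_digit]
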